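-- pv_equiv track=rewrite | github.com/awslabs/pptod | data/pre-training_corpora/utlis/process_schema_guided_dataset.py | zip_turn_list
-- ===== SOURCE A (Python) =====
-- def zip_turn_list(item):
--     sess_list = item['turns']
--     zip_turn_list = []
--     one_turn_list = []
--     target_speaker = "USER"
--     target_map = {"USER":"SYSTEM",
--                  "SYSTEM":"USER"}
--     for turn in sess_list:
--         if turn['speaker'] == target_speaker:
--             target_speaker = target_map[turn['speaker']]
--             one_turn_list.append(turn)
--             if len(one_turn_list) == 2:
--                 zip_turn_list.append(one_turn_list)
--                 one_turn_list = []
--         else: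
--             continue
--     return zip_turn_list
-- ===== SOURCE B (Python) =====
-- def zip_turn_list(item):
--     # Nested-search algorithm: no alternating-state filter and no partial-pair buffer.
--     # Scan for the next USER turn; from there scan ahead for the next SYSTEM turn;
--     # emit the pair and resume after the SYSTEM turn.
--     turns = item['turns']
--     pairs = []
--     i, n = 0, len(turns)
--     while i < n:
--         if turns[i]['speaker'] == "USER":
--             u = turns[i]
--             j = i + 1
--             while j < n and turns[j]['speaker'] != "SYSTEM":
--                 j += 1
--             if j == n:
--                 break
--             pairs.append([u, turns[j]])
--             i = j + 1
--         else:
--             i += 1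
--     return pairs
-- ===== Notes on version B (the rewrite author's own statement) =====
-- stated objective: alternative
-- what changed: A makes one pass with an alternating target-speaker state and a partial-pair buffer; B uses a nested-search algorithm with no alternating state or buffer: it scans for the next USER turn, then scans ahead from it for the next SYSTEM turn, emits the pair and resumes after it.
import Mathlib
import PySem

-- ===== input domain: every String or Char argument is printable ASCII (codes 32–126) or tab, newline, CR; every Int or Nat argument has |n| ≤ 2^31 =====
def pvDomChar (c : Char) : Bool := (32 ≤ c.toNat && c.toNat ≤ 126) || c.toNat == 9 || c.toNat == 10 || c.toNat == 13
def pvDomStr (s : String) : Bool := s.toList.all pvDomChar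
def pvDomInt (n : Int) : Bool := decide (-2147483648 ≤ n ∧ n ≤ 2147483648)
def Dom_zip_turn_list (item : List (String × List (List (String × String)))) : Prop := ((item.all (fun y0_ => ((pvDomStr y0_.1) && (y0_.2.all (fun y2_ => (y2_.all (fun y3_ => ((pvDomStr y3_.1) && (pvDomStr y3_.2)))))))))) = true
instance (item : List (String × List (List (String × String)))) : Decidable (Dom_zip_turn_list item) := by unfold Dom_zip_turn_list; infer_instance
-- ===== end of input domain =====

-- B replaces A's alternating-state single pass by a nested search (find next USER, then next
-- SYSTEM after it); same return value; neither program mutates its argument.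

-- ===== PORT A =====
-- the for loop of A, state = (zip_turn_list, one_turn_list, target_speaker)
def zipLoopA : List (List (String × String)) → List (List (List (String × String))) → List (List (String × String)) → String → List (List (List (String × String)))
  | [], ztl, _, _ => ztl
  | t :: rest, ztl, one, tgt =>
    match (PySem.Dict.mk t).get? "speaker" with
    | none => zipLoopA rest ztl one tgt   -- turn['speaker'] raises KeyError here; excluded by Pre_
    | some sp =>
      if sp == tgt then
        -- target_speaker = target_map[turn['speaker']]; the key sp == tgt is present whenever tgt ∈ {USER,SYSTEM}
        let tgt' := ((PySem.Dict.mk [("USER", "SYSTEM"), ("SYSTEM", "USER")]).get? sp).getD ""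
        let one' := one ++ [t]
        if one'.length == 2 then zipLoopA rest (ztl ++ [one']) [] tgt'
        else zipLoopA rest ztl one' tgt'
      else zipLoopA rest ztl one tgt

def zip_turn_list (item : List (String × List (List (String × String)))) : List (List (List (String × String))) :=
  match (PySem.Dict.mk item).get? "turns" with
  | none => []   -- item['turns'] raises KeyError; excluded by Pre_
  | some sess => zipLoopA sess [] [] "USER"

-- ===== PORT B =====
-- B's inner while loop: advance j past turns whose speaker is not `sp` (returns the suffix at j)
def skipToB (sp : String) : List (List (String × String)) → List (List (String × String))
  | [] => []
  | t :: rest =>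
    match (PySem.Dict.mk t).get? "speaker" with
    | none => skipToB sp rest   -- turn['speaker'] raises KeyError here; excluded by Pre_
    | some s => if s == sp then t :: rest else skipToB sp rest

lemma skipToB_length (sp : String) (l : List (List (String × String))) :
    (skipToB sp l).length ≤ l.length := by
  induction l with
  | nil => simp [skipToB]
  | cons t rest ih =>
    simp only [skipToB]
    cases (PySem.Dict.mk t).get? "speaker" with
    | none => exact Nat.le_succ_of_le ih
    | some s =>
      by_cases h : s == sp
      · simp [h]
      · simp only [h]; exact Nat.le_succ_of_le ih

-- B's outer while loop (the suffix starting at i) and the pair-completion step after the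
-- inner search are mutually recursive: on a USER head, search the tail for SYSTEM and complete.
mutual
def zipLoopB : List (List (String × String)) → List (List (List (String × String)))
  | [] => []
  | t :: rest =>
    match (PySem.Dict.mk t).get? "speaker" with
    | none => zipLoopB rest   -- turn['speaker'] raises KeyError here; excluded by Pre_
    | some s =>
      if s == "USER" then pairGoB t (skipToB "SYSTEM" rest)
      else zipLoopB rest
termination_by l => l.length
decreasing_by
  all_goals simp
  all_goals exact skipToB_length "SYSTEM" rest

-- 'if j == n: break' / otherwise emit the pair and resume at j+1
def pairGoB (u : List (String × String)) : List (List (String × String)) → List (List (List (String × String)))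
  | [] => []
  | s' :: rest2 => [u, s'] :: zipLoopB rest2
termination_by l => l.length
decreasing_by simp
end

def zip_turn_list_alt (item : List (String × List (List (String × String)))) : List (List (List (String × String))) :=
  match (PySem.Dict.mk item).get? "turns" with
  | none => []   -- item['turns'] raises KeyError; excluded by Pre_
  | some sess => zipLoopB sess

-- ===== PRECONDITION & SPEC =====
-- Pre_ excludes exactly the inputs where A raises KeyError: item lacking a 'turns' key, or a turn lacking a 'speaker' key.
def Pre_zip_turn_list (item : List (String × List (List (String × String)))) : Prop :=
  ((PySem.Dict.mk item).get? "turns").isSome = true ∧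
  (((PySem.Dict.mk item).get? "turns").getD []).all
    (fun t => ((PySem.Dict.mk t).get? "speaker").isSome) = true
instance (item : List (String × List (List (String × String)))) : Decidable (Pre_zip_turn_list item) := by unfold Pre_zip_turn_list; infer_instance

def pvWitness_zip_turn_list : (List (String × List (List (String × String)))) :=
  [("turns", [[("speaker", "USER")], [("speaker", "SYSTEM")]])]

def Spec_zip_turn_list (item : List (String × List (List (String × String)))) (out : List (List (List (String × String)))) : Prop := out = zip_turn_list_alt item
instance (item : List (String × List (List (String × String)))) (out : List (List (List (String × String)))) : Decidable (Spec_zip_turn_list item out) := by unfold Spec_zip_turn_list; infer_instance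

-- ===== CLAIM =====
def Claim_equal_zip_turn_list : Prop := ∀ (item : List (String × List (List (String × String)))), Dom_zip_turn_list item → Pre_zip_turn_list item → Spec_zip_turn_list item (zip_turn_list item)

-- ===== LEMMAS AND PROOFS =====

-- A's loop with an empty buffer and target USER equals B's outer loop; with buffer [u] and
-- target SYSTEM it equals B's inner search followed by the pair-completion step.
lemma loop_eq (sess : List (List (String × String))) :
    (∀ ztl, zipLoopA sess ztl [] "USER" = ztl ++ zipLoopB sess) ∧
    (∀ ztl u, zipLoopA sess ztl [u] "SYSTEM" = ztl ++ pairGoB u (skipToB "SYSTEM" sess)) := by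
  induction sess with
  | nil => constructor <;> intros <;> simp [zipLoopA, zipLoopB, pairGoB, skipToB]
  | cons t rest ih =>
    constructor
    · intro ztl
      show zipLoopA (t :: rest) ztl [] "USER" = _
      simp only [zipLoopA, zipLoopB]
      cases h : (PySem.Dict.mk t).get? "speaker" with
      | none => exact ih.1 ztl
      | some sp =>
        by_cases hsp : sp == "USER"
        · have hsp' : sp = "USER" := by simpa using hsp
          subst hsp'
          simp only [hsp, if_true]
          exact ih.2 ztl t
        · simp only [hsp, Bool.false_eq_true, if_false]
          exact ih.1 ztl
    · intro ztl u
      show zipLoopA (t :: rest) ztl [u] "SYSTEM" = _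
      simp only [zipLoopA, skipToB]
      cases h : (PySem.Dict.mk t).get? "speaker" with
      | none => exact ih.2 ztl u
      | some sp =>
        by_cases hsp : sp == "SYSTEM"
        · have hsp' : sp = "SYSTEM" := by simpa using hsp
          subst hsp'
          have h2 := ih.1 (ztl ++ [[u, t]])
          simp only [hsp, if_true, pairGoB]
          simpa using h2
        · simp only [hsp, Bool.false_eq_true, if_false]
          exact ih.2 ztl u

-- ===== VERDICT =====
theorem zip_turn_list_spec : Claim_equal_zip_turn_list := by
  intro item _ _
  unfold Spec_zip_turn_list zip_turn_list zip_turn_list_alt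
  cases h : (PySem.Dict.mk item).get? "turns" with
  | none => rfl
  | some sess => simpa using (loop_eq sess).1 []
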